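-- pv_equiv track=rewrite | github.com/pgarrett-scripps/StreamlitSpectrumViewer | util.py | generate_fragmentation_latex
-- ===== SOURCE A (Python) =====
-- def generate_fragmentation_latex(peptide, forward_indices, reverse_indices):
--     """
--     Generates a LaTeX string for visualizing peptide fragmentation sites.
--
--     :param peptide: The peptide sequence.
--     :param forward_indices: A list of indices for forward fragment ion sites.
--     :param reverse_indices: A list of indices for reverse fragment ion sites.
--     :return: A LaTeX string representing the peptide with fragmentation sites.
--     """
--     # Initialize an empty list to store each part of the LaTeX string
--     latex_parts = []
--
--     # Process each amino acid in the peptide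
--     for i, aa in enumerate(peptide):
--         # Add the amino acid to the LaTeX parts
--         latex_parts.append(aa)
--
--         # Check if this position is a forward fragmentation site
--         if i in forward_indices:
--             latex_parts.append(r"_{\rfloor}")
--         # Check if this position is a reverse fragmentation site
--         # Note: Reverse indices count from the end of the peptide
--         if (len(peptide) - 1 - i) in reverse_indices:
--             latex_parts.append(r"^{\lceil}")
--
--     # Join all parts into a single string and return
--     return "".join(latex_parts)
-- ===== SOURCE B (Python) =====
-- def generate_fragmentation_latex(peptide, forward_indices, reverse_indices):
--     # Segment-based assembly: compute the in-range fragmentation sites as sets,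
--     # then emit whole peptide slices between consecutive sorted sites, inserting
--     # markers only at the sites (instead of testing every position).
--     n = len(peptide)
--     fwd = {i for i in forward_indices if 0 <= i < n}
--     rev = {n - 1 - i for i in reverse_indices if 0 <= n - 1 - i < n}
--     pieces = []
--     prev = 0
--     for p in sorted(fwd | rev):
--         pieces.append(peptide[prev:p + 1])
--         if p in fwd:
--             pieces.append(r"_{\rfloor}")
--         if p in rev:
--             pieces.append(r"^{\lceil}")
--         prev = p + 1
--     pieces.append(peptide[prev:])
--     return "".join(pieces)
-- ===== Notes on version B (the rewrite author's own statement) =====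
-- stated objective: faster
-- what changed: B assembles the output from whole peptide slices between consecutive sorted in-range fragmentation sites (built once as sets), instead of A's per-character loop that tests list membership at every position.
import Mathlib
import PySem

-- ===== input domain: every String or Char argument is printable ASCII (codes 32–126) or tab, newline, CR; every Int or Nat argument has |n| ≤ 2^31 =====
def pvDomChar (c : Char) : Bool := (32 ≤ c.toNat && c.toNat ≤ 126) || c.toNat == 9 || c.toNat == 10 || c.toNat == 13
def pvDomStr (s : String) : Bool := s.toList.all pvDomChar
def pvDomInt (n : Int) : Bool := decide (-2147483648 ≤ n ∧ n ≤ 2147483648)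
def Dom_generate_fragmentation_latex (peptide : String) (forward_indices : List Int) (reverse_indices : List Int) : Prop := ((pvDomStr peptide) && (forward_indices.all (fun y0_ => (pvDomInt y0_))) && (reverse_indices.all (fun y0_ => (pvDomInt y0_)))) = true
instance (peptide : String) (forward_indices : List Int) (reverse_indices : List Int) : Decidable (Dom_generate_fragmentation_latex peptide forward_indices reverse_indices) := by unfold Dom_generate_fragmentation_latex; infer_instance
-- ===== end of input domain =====

-- B assembles the output from peptide slices between consecutive sorted in-range
-- fragmentation sites instead of A's per-position membership tests (objective: faster).

-- ===== PORT A =====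
-- literal port of A: fold over enumerate(peptide), appending the amino acid and the
-- conditional markers to the accumulated list of string pieces, then "".join
def generate_fragmentation_latex (peptide : String) (forward_indices : List Int) (reverse_indices : List Int) : String :=
  let chars := peptide.toList
  let parts : List (List Char) :=
    (PySem.List.enumerate chars).foldl (fun acc q =>
      let acc := acc ++ [[q.2]]
      let acc := if forward_indices.contains q.1 then acc ++ ["_{\\rfloor}".toList] else acc
      if reverse_indices.contains (PySem.Str.len peptide - 1 - q.1) then acc ++ ["^{\\lceil}".toList] else acc) []
  String.mk parts.flatten

-- ===== PORT B =====
-- literal port of Source B: in-range forward/reverse site SETS, then one loop over the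
-- sorted union emitting the slice up to each site plus its markers, then the tail slice
-- (pvStepB is the loop body of Source B's 'for p in sorted(fwd | rev)' loop)
def pvStepB (chars : List Char) (fwd rev : List Int) (st : List (List Char) × Int) (p : Int) : List (List Char) × Int :=
  let pieces := st.1 ++ [PySem.List.slice chars (some st.2) (some (p + 1))]
  let pieces := if fwd.contains p then pieces ++ ["_{\\rfloor}".toList] else pieces
  let pieces := if rev.contains p then pieces ++ ["^{\\lceil}".toList] else pieces
  (pieces, p + 1)

def generate_fragmentation_latex_alt (peptide : String) (forward_indices : List Int) (reverse_indices : List Int) : String :=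
  let chars := peptide.toList
  let n : Int := (chars.length : Int)
  let fwd : PySem.Set Int := PySem.Set.ofList (forward_indices.filter (fun i => decide (0 ≤ i) && decide (i < n)))
  let rev : PySem.Set Int := PySem.Set.ofList ((reverse_indices.map (fun i => n - 1 - i)).filter (fun p => decide (0 ≤ p) && decide (p < n)))
  let sites := PySem.List.sorted (PySem.Set.union fwd rev) (fun x => x) false
  let st := sites.foldl (pvStepB chars fwd rev) ([], 0)
  String.mk ((st.1 ++ [PySem.List.slice chars (some st.2) none]).flatten)

-- ===== PRECONDITION & SPEC =====
def Spec_generate_fragmentation_latex (peptide : String) (forward_indices : List Int) (reverse_indices : List Int) (out : String) : Prop := out = generate_fragmentation_latex_alt peptide forward_indices reverse_indices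
instance (peptide : String) (forward_indices : List Int) (reverse_indices : List Int) (out : String) : Decidable (Spec_generate_fragmentation_latex peptide forward_indices reverse_indices out) := by unfold Spec_generate_fragmentation_latex; infer_instance

-- ===== CLAIM =====
def Claim_equal_generate_fragmentation_latex : Prop := ∀ (peptide : String) (forward_indices : List Int) (reverse_indices : List Int), Dom_generate_fragmentation_latex peptide forward_indices reverse_indices → Spec_generate_fragmentation_latex peptide forward_indices reverse_indices (generate_fragmentation_latex peptide forward_indices reverse_indices)

-- ===== LEMMAS AND PROOFS =====

-- the marker string A appends after position k (f, r the two index lists, n = len(peptide))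
def pvMark (f r : List Int) (n : Int) (k : Int) : List Char :=
  (if f.contains k then "_{\\rfloor}".toList else []) ++
  (if r.contains (n - 1 - k) then "^{\\lceil}".toList else [])

-- A's output from position k onward, over the remaining characters l
def pvILeave (f r : List Int) (n : Int) (l : List Char) (k : Int) : List Char :=
  (PySem.List.enumerate l k).flatMap (fun q => q.2 :: pvMark f r n q.1)

-- B's output from cursor prev onward, over the remaining sites
def pvAsm (chars : List Char) (fwd rev : List Int) (prev : Int) : List Int → List Char
  | [] => PySem.List.slice chars (some prev) none
  | p :: ps =>
      PySem.List.slice chars (some prev) (some (p + 1)) ++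
      ((if fwd.contains p then "_{\\rfloor}".toList else []) ++
       (if rev.contains p then "^{\\lceil}".toList else [])) ++
      pvAsm chars fwd rev (p + 1) ps

theorem pvILeave_cons (f r : List Int) (n : Int) (c : Char) (l : List Char) (k : Int) :
    pvILeave f r n (c :: l) k = c :: (pvMark f r n k ++ pvILeave f r n l (k + 1)) := by
  simp [pvILeave, PySem.List.enumerate_cons]

-- a window with no marked positions contributes the characters verbatim
theorem pvILeave_no_marks (f r : List Int) (n : Int) (l : List Char) (k : Int)
    (h : ∀ j, k ≤ j → j < k + l.length → pvMark f r n j = []) :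
    pvILeave f r n l k = l := by
  induction l generalizing k with
  | nil => rfl
  | cons c l ih =>
      have hlc : ((c :: l).length : Int) = (l.length : Int) + 1 := by simp
      rw [pvILeave_cons, h k (le_refl k) (by omega), ih (k + 1) (fun j h1 h2 => h j (by omega) (by omega))]
      simp

-- split A's window at the first marked position p
theorem pvILeave_split (f r : List Int) (n : Int) (l : List Char) (k p : Int)
    (hkp : k ≤ p) (hp : p < k + l.length)
    (hno : ∀ j, k ≤ j → j < p → pvMark f r n j = []) :
    pvILeave f r n l k =
      l.take (p + 1 - k).toNat ++ pvMark f r n p ++ pvILeave f r n (l.drop (p + 1 - k).toNat) (p + 1) := by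
  induction l generalizing k with
  | nil => simp only [List.length_nil, Int.natCast_zero, add_zero] at hp; omega
  | cons c l ih =>
      have hlc : ((c :: l).length : Int) = (l.length : Int) + 1 := by simp
      rw [pvILeave_cons]
      by_cases hk : k = p
      · subst hk
        have ht : (k + 1 - k).toNat = 1 := by omega
        rw [ht]; simp
      · have hkp' : k + 1 ≤ p := by omega
        have hm : pvMark f r n k = [] := hno k (le_refl k) (by omega)
        have ht : (p + 1 - k).toNat = (p + 1 - (k + 1)).toNat + 1 := by omega
        rw [hm, ih (k + 1) hkp' (by omega)
              (fun j h1 h2 => hno j (by omega) h2), ht]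
        simp

-- the sorted-site assembly equals A's interleaving, given the site-list invariants
theorem pvAsm_eq_pvILeave (chars : List Char) (f r fwd rev : List Int) (sites : List Int)
    (k : Int) (hk0 : 0 ≤ k) (hkn : k ≤ (chars.length : Int))
    (hsort : sites.Pairwise (· < ·))
    (hrange : ∀ p ∈ sites, k ≤ p ∧ p < (chars.length : Int))
    (hclosed : ∀ j, k ≤ j → j < (chars.length : Int) →
        pvMark f r (chars.length : Int) j ≠ [] → j ∈ sites)
    (hmk : ∀ p ∈ sites,
        ((if fwd.contains p then "_{\\rfloor}".toList else []) ++
         (if rev.contains p then "^{\\lceil}".toList else []))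
        = pvMark f r (chars.length : Int) p) :
    pvAsm chars fwd rev k sites = pvILeave f r (chars.length : Int) (chars.drop k.toNat) k := by
  induction sites generalizing k with
  | nil =>
      have hlen : k + ((chars.drop k.toNat).length : Int) = (chars.length : Int) := by
        simp [List.length_drop]; omega
      rw [pvILeave_no_marks f r _ _ k (fun j h1 h2 => by
        by_contra hne
        exact absurd (hclosed j h1 (by omega) hne) (List.not_mem_nil))]
      show PySem.List.slice chars (some k) none = chars.drop k.toNat
      have : k = ((k.toNat : Nat) : Int) := by omega
      rw [this, PySem.List.slice_from_natCast]
      simp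
      omega
  | cons p ps ih =>
      obtain ⟨hkp, hpn⟩ := hrange p List.mem_cons_self
      have hps : ∀ q ∈ ps, p < q := fun q hq => (List.pairwise_cons.mp hsort).1 q hq
      have hsplit := pvILeave_split f r (chars.length : Int) (chars.drop k.toNat) k p hkp
        (by simp [List.length_drop]; omega)
        (fun j h1 h2 => by
          by_contra hne
          have hmem := hclosed j h1 (by omega) hne
          rcases List.mem_cons.mp hmem with h | h
          · omega
          · exact absurd (hps j h) (by omega))
      rw [hsplit]
      show PySem.List.slice chars (some k) (some (p + 1)) ++ _ ++ pvAsm chars fwd rev (p + 1) ps = _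
      have hdd : (chars.drop k.toNat).drop (p + 1 - k).toNat = chars.drop (p + 1).toNat := by
        rw [List.drop_drop]; congr 1; omega
      have hsl : PySem.List.slice chars (some k) (some (p + 1)) = (chars.drop k.toNat).take (p + 1 - k).toNat := by
        have h1 : k = ((k.toNat : Nat) : Int) := by omega
        have h2 : p + 1 = ((p + 1).toNat : Int) := by omega
        rw [h1, h2, PySem.List.slice_natCast]
        congr 1; omega
      rw [hsl, hdd, hmk p List.mem_cons_self,
          ih (p + 1) (by omega) (by omega) (List.pairwise_cons.mp hsort).2
            (fun q hq => ⟨by have := hps q hq; omega, (hrange q (List.mem_cons_of_mem p hq)).2⟩)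
            (fun j h1 h2 hne => by
              have hmem := hclosed j (by omega) h2 hne
              rcases List.mem_cons.mp hmem with h | h
              · omega
              · exact h)
            (fun q hq => hmk q (List.mem_cons_of_mem p hq))]

-- B's fold with the (pieces, prev) state flattens to the recursive assembly
theorem pvFoldl_eq_pvAsm (chars : List Char) (fwd rev : List Int) (sites : List Int)
    (acc : List (List Char)) (prev : Int) :
    (((sites.foldl (pvStepB chars fwd rev) (acc, prev)).1 ++
      [PySem.List.slice chars (some ((sites.foldl (pvStepB chars fwd rev) (acc, prev)).2)) none]).flatten)
    = acc.flatten ++ pvAsm chars fwd rev prev sites := by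
  induction sites generalizing acc prev with
  | nil => simp [pvAsm]
  | cons p ps ih =>
      simp only [List.foldl_cons, pvStepB]
      by_cases h1 : fwd.contains p <;> by_cases h2 : rev.contains p <;>
        simp only [h1, h2, if_true, if_false, Bool.false_eq_true] <;>
        (rw [ih]; simp only [pvAsm, h1, h2, if_true, if_false, Bool.false_eq_true,
          List.flatten_append, List.flatten_cons, List.flatten_nil, List.append_assoc,
          List.append_nil, List.nil_append])

-- ===== VERDICT =====
theorem generate_fragmentation_latex_spec : Claim_equal_generate_fragmentation_latex := by
  intro peptide f r _
  unfold Spec_generate_fragmentation_latex generate_fragmentation_latex generate_fragmentation_latex_alt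
  simp only []
  set chars := peptide.toList with hchars
  set n : Int := (chars.length : Int) with hn
  -- rewrite A's accumulator loop into pvILeave
  have hbodyA :
      (fun (acc : List (List Char)) (q : Int × Char) =>
        let acc := acc ++ [[q.2]]
        let acc := if f.contains q.1 then acc ++ ["_{\\rfloor}".toList] else acc
        if r.contains (PySem.Str.len peptide - 1 - q.1) then acc ++ ["^{\\lceil}".toList] else acc)
      = (fun acc q => acc ++
          ([[q.2]] ++ (if f.contains q.1 then ["_{\\rfloor}".toList] else []) ++
           (if r.contains (n - 1 - q.1) then ["^{\\lceil}".toList] else []))) := by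
    funext acc q
    have hlen : PySem.Str.len peptide = n := by simp [PySem.Str.len_eq, hn, hchars]
    simp only [hlen]
    split <;> split <;> simp
  rw [hbodyA, PySem.List.foldl_append_eq_flatMap]
  have hA : ((PySem.List.enumerate chars).flatMap (fun q =>
        [[q.2]] ++ (if f.contains q.1 then ["_{\\rfloor}".toList] else []) ++
        (if r.contains (n - 1 - q.1) then ["^{\\lceil}".toList] else []))).flatten
      = pvILeave f r n chars 0 := by
    rw [pvILeave, List.flatten_eq_flatMap, List.flatMap_assoc]
    apply List.flatMap_congr
    intro q _
    unfold pvMark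
    split <;> split <;> simp
  rw [List.nil_append, hA]
  -- name B's site sets and sorted site list
  set fwd : PySem.Set Int := PySem.Set.ofList (f.filter (fun i => decide (0 ≤ i) && decide (i < n))) with hfwd
  set rev : PySem.Set Int := PySem.Set.ofList ((r.map (fun i => n - 1 - i)).filter (fun p => decide (0 ≤ p) && decide (p < n))) with hrev
  set sites := PySem.List.sorted (PySem.Set.union fwd rev) (fun x => x) false with hsites
  rw [pvFoldl_eq_pvAsm chars fwd rev sites [] 0]
  have hmemf : ∀ p : Int, p ∈ fwd ↔ (f.contains p ∧ 0 ≤ p ∧ p < n) := by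
    intro p
    rw [hfwd, PySem.Set.mem_ofList, List.mem_filter]
    simp
  have hmemr : ∀ p : Int, p ∈ rev ↔ (r.contains (n - 1 - p) ∧ 0 ≤ p ∧ p < n) := by
    intro p
    rw [hrev, PySem.Set.mem_ofList, List.mem_filter]
    constructor
    · rintro ⟨hmem, hcond⟩
      obtain ⟨i, hi, hip⟩ := List.mem_map.mp hmem
      simp at hcond
      refine ⟨?_, hcond⟩
      have : n - 1 - p = i := by omega
      rw [List.contains_iff_mem, this]; exact hi
    · rintro ⟨hc, h0, h1⟩
      refine ⟨List.mem_map.mpr ⟨n - 1 - p, List.contains_iff_mem.mp hc, by omega⟩, by simp; omega⟩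
  have hmems : ∀ p : Int, p ∈ sites ↔ p ∈ fwd ∨ p ∈ rev := by
    intro p
    rw [hsites, PySem.List.mem_sorted, PySem.Set.union, PySem.Set.mem_update]
  have hsort : sites.Pairwise (· < ·) := by
    have hnd : (PySem.Set.union fwd rev).Nodup :=
      PySem.Set.nodup_update fwd rev (PySem.Set.nodup_ofList _)
    have hnd' : sites.Nodup := by
      rw [hsites]
      exact ((PySem.List.sorted_perm (PySem.Set.union fwd rev) (fun x : Int => x) false).nodup_iff).mpr hnd
    have hle : sites.Pairwise (fun a b : Int => a ≤ b) := by
      rw [hsites]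
      exact PySem.List.sorted_pairwise (PySem.Set.union fwd rev) (fun x : Int => x)
    exact (hle.and hnd').imp (fun h => lt_of_le_of_ne h.1 h.2)
  rw [pvAsm_eq_pvILeave chars f r fwd rev sites 0 (le_refl 0) (by omega) hsort
    (fun p hp => by
      rcases (hmems p).mp hp with h | h
      · exact ⟨((hmemf p).mp h).2.1, ((hmemf p).mp h).2.2⟩
      · exact ⟨((hmemr p).mp h).2.1, ((hmemr p).mp h).2.2⟩)
    (fun j h1 h2 hne => by
      rw [hmems j]
      unfold pvMark at hne
      by_cases hcf : f.contains j = true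
      · exact Or.inl ((hmemf j).mpr ⟨hcf, h1, h2⟩)
      · by_cases hcr : r.contains (n - 1 - j) = true
        · exact Or.inr ((hmemr j).mpr ⟨hcr, h1, h2⟩)
        · rw [Bool.not_eq_true] at hcf hcr
          rw [hcf, hcr] at hne
          simp at hne)
    (fun p hp => by
      have hpr : 0 ≤ p ∧ p < n := by
        rcases (hmems p).mp hp with h | h
        · exact ((hmemf p).mp h).2
        · exact ((hmemr p).mp h).2
      have hcf : List.contains fwd p = f.contains p := by
        rw [Bool.eq_iff_iff]
        simp only [List.contains_iff_mem, hmemf p]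
        tauto
      have hcr : List.contains rev p = r.contains (n - 1 - p) := by
        rw [Bool.eq_iff_iff]
        simp only [List.contains_iff_mem, hmemr p]
        tauto
      rw [hcf, hcr, pvMark])]
  simp only [pvILeave]
  rfl
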